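-- pv_equiv track=rewrite | github.com/NateDiesel/auto-blogger-api | agents/SEO_Optimizer/seo_optimizer_api.py | optimize_content
-- ===== SOURCE A (Python) =====
-- def optimize_content(content, mode):
--     replacements = {
--         "SEO": "Search Engine Optimization",
--         "content": "digital content",
--         "marketing": "digital marketing strategy"
--     }
--     if mode == "aggressive":
--         for word, replacement in replacements.items():
--             content = content.replace(word, replacement)
--     return content
-- ===== SOURCE B (Python) =====
-- def optimize_content(content, mode):
--     replacements = {
--         "SEO": "Search Engine Optimization",
--         "content": "digital content",
--         "marketing": "digital marketing strategy"
--     }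
--     if mode != "aggressive":
--         return content
--     out = []
--     i = 0
--     n = len(content)
--     while i < n:
--         for word, repl in replacements.items():
--             if content.startswith(word, i):
--                 out.append(repl)
--                 i += len(word)
--                 break
--         else:
--             out.append(content[i])
--             i += 1
--     return "".join(out)
-- ===== Notes on version B (the rewrite author's own statement) =====
-- stated objective: alternative
-- what changed: Replaced the three sequential full-string .replace passes by a single left-to-right scan that tries the three keys at each position and emits the replacement or the character, joining the pieces at the end.
import Mathlib
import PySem

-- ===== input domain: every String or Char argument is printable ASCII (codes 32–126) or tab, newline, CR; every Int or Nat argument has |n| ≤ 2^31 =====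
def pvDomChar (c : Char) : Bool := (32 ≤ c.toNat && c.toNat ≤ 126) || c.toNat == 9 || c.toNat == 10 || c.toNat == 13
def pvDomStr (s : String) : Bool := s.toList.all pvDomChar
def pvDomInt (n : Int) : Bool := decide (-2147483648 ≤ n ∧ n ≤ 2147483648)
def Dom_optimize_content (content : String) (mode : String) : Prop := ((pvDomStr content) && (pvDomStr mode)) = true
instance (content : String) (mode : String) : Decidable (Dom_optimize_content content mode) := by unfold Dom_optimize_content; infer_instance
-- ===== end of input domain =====

-- B replaces A's three sequential full-string .replace passes with one left-to-right scan
-- over the content (alternative decomposition, same exact result; return value only).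

-- ===== PORT A =====
def optimize_content (content : String) (mode : String) : String :=
  if mode == "aggressive" then
    let content := PySem.Str.replace content "SEO" "Search Engine Optimization"
    let content := PySem.Str.replace content "content" "digital content"
    let content := PySem.Str.replace content "marketing" "digital marketing strategy"
    content
  else content

-- ===== PORT B =====
-- Source B's while loop over positions: at each position try the three keys in dict order,
-- emit the replacement and jump, else emit the character and advance.
def scanRepl : List Char → List Char
  | [] => []
  | c :: t =>
    if ("SEO".toList).isPrefixOf (c :: t) then
      "Search Engine Optimization".toList ++ scanRepl (t.drop 2)
    else if ("content".toList).isPrefixOf (c :: t) then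
      "digital content".toList ++ scanRepl (t.drop 6)
    else if ("marketing".toList).isPrefixOf (c :: t) then
      "digital marketing strategy".toList ++ scanRepl (t.drop 8)
    else c :: scanRepl t
termination_by s => s.length
decreasing_by all_goals simp

def optimize_content_alt (content : String) (mode : String) : String :=
  if mode == "aggressive" then String.ofList (scanRepl content.toList)
  else content

-- ===== PRECONDITION & SPEC =====
def Spec_optimize_content (content : String) (mode : String) (out : String) : Prop := out = optimize_content_alt content mode
instance (content : String) (mode : String) (out : String) : Decidable (Spec_optimize_content content mode out) := by unfold Spec_optimize_content; infer_instance

-- ===== CLAIM (what is proved, stated in full; the proofs are below) =====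
def Claim_equal_optimize_content : Prop := ∀ (content : String) (mode : String), Dom_optimize_content content mode → Spec_optimize_content content mode (optimize_content content mode)

-- ===== LEMMAS AND PROOFS =====

-- Structural version of Python str.replace for a nonempty pattern (proof helper).
def pyRep (p v : List Char) : List Char → List Char
  | [] => []
  | c :: t =>
    if p.isPrefixOf (c :: t) then v ++ pyRep p v (t.drop (p.length - 1))
    else c :: pyRep p v t
termination_by s => s.length
decreasing_by all_goals simp

theorem go_eq_pyRep (p v : List Char) (hp : p ≠ []) :
    ∀ fuel l acc, l.length ≤ fuel →
      PySem.Chars.replace.go p v fuel l acc = acc.reverse ++ pyRep p v l := by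
  intro fuel
  induction fuel with
  | zero =>
    intro l acc h
    have : l = [] := List.eq_nil_of_length_eq_zero (Nat.le_zero.mp h)
    subst this
    simp [PySem.Chars.replace.go, pyRep]
  | succ n ih =>
    intro l acc h
    match l with
    | [] => simp [PySem.Chars.replace.go, pyRep]
    | c :: t =>
      rw [PySem.Chars.replace.go]
      by_cases hpre : p.isPrefixOf (c :: t) = true
      · rw [if_pos hpre]
        have hlen : 1 ≤ p.length := by
          cases p with
          | nil => exact absurd rfl hp
          | cons a p' => simp
        have hdrop : (List.drop p.length (c :: t)).length ≤ n := by
          simp at h ⊢; omega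
        rw [ih _ _ hdrop]
        rw [pyRep, if_pos hpre]
        have : List.drop p.length (c :: t) = t.drop (p.length - 1) := by
          cases p with
          | nil => exact absurd rfl hp
          | cons a p' => simp
        rw [this]
        simp
      · rw [if_neg hpre]
        have ht : t.length ≤ n := by simp at h; omega
        rw [ih _ _ ht]
        rw [pyRep, if_neg hpre]
        simp

theorem replace_eq_pyRep (p v s : List Char) (hp : p ≠ []) :
    PySem.Chars.replace s p v = pyRep p v s := by
  rw [PySem.Chars.replace]
  rw [if_neg (by simp [List.isEmpty_iff, hp])]
  simpa using go_eq_pyRep p v hp s.length s [] le_rfl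

theorem pyRep_match (p v u : List Char) (hp : p ≠ []) :
    pyRep p v (p ++ u) = v ++ pyRep p v u := by
  match p with
  | [] => exact absurd rfl hp
  | a :: p' =>
    rw [List.cons_append, pyRep]
    rw [if_pos (by simp [List.isPrefixOf_iff_prefix])]
    have hd : List.drop ((a :: p').length - 1) (p' ++ u) = u := by
      simp
    rw [hd]

-- appending past a block K in which no alignment of p can start
theorem pyRep_append (p v K : List Char)
    (h : ∀ i < K.length, ∃ j, j < p.length ∧ i + j < K.length ∧ K[i+j]? ≠ p[j]?) :
    ∀ u, pyRep p v (K ++ u) = K ++ pyRep p v u := by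
  induction K with
  | nil => simp
  | cons c K' ih =>
    intro u
    rw [List.cons_append, pyRep]
    rw [if_neg ?_]
    · rw [ih (fun i hi => by
        obtain ⟨j, hj, hij, hne⟩ := h (i+1) (by simpa using Nat.succ_lt_succ hi)
        exact ⟨j, hj, by simpa using Nat.lt_of_succ_lt_succ (by simpa [Nat.add_right_comm] using hij),
          by simpa [Nat.add_right_comm] using hne⟩) u]
      simp
    · intro hpre
      rw [List.isPrefixOf_iff_prefix] at hpre
      obtain ⟨j, hj, hij, hne⟩ := h 0 (by simp)
      simp only [Nat.zero_add] at hij hne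
      apply hne
      obtain ⟨r, hr⟩ := hpre
      rw [← List.getElem?_append_left (l₂ := u) hij, List.cons_append, ← hr,
        List.getElem?_append_left hj]

-- prefix pullback: a prefix of the output avoiding both heads was a prefix of the input
theorem pyRep_prefix_pullback (a b : Char) (p' v' : List Char) :
    ∀ s w, w <+: pyRep (a :: p') (b :: v') s → a ∉ w → b ∉ w → w <+: s := by
  intro s
  induction s using pyRep.induct (a :: p') with
  | case1 =>
    intro w hw _ _
    simpa [pyRep] using hw
  | case2 c t hpre ih =>
    intro w hw ha hb
    rw [pyRep, if_pos hpre] at hw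
    match w with
    | [] => exact List.nil_prefix
    | d :: w' =>
      exfalso
      obtain ⟨t1, ht⟩ := hw
      have hd : d = b := by simpa using congrArg List.head? ht
      exact hb (hd ▸ List.mem_cons_self)
  | case3 c t hpre ih =>
    intro w hw ha hb
    rw [pyRep, if_neg hpre] at hw
    match w with
    | [] => exact List.nil_prefix
    | d :: w' =>
      rw [List.cons_prefix_cons] at hw ⊢
      exact ⟨hw.1, ih w' hw.2 (fun h => ha (List.mem_cons_of_mem _ h))
        (fun h => hb (List.mem_cons_of_mem _ h))⟩

theorem scan_eq_three (s : List Char) :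
    pyRep "marketing".toList "digital marketing strategy".toList
      (pyRep "content".toList "digital content".toList
        (pyRep "SEO".toList "Search Engine Optimization".toList s)) = scanRepl s := by
  induction s using scanRepl.induct with
  | case1 => simp [pyRep, scanRepl]
  | case2 c t h ih =>
    rw [List.isPrefixOf_iff_prefix] at h
    obtain ⟨u, hu⟩ := h
    rw [show "SEO".toList = ['S', 'E', 'O'] from rfl] at hu
    have hc : c = 'S' := (List.cons.injEq ..).mp hu.symm |>.1
    have ht : t = 'E' :: 'O' :: u := by simpa using ((List.cons.injEq ..).mp hu.symm).2
    subst hc ht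
    conv_lhs => rw [show ('S' :: 'E' :: 'O' :: u) = "SEO".toList ++ u from rfl]
    rw [pyRep_match _ _ _ (by simp)]
    rw [pyRep_append "content".toList "digital content".toList
      "Search Engine Optimization".toList (by decide)]
    rw [pyRep_append "marketing".toList "digital marketing strategy".toList
      "Search Engine Optimization".toList (by decide)]
    rw [scanRepl]
    rw [if_pos (by rw [List.isPrefixOf_iff_prefix]; exact ⟨u, rfl⟩)]
    simp only [List.drop_succ_cons, List.drop_zero] at ih ⊢
    rw [ih]
  | case3 c t h1 h2 ih =>
    rw [List.isPrefixOf_iff_prefix] at h2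
    obtain ⟨u, hu⟩ := h2
    rw [show "content".toList = ['c','o','n','t','e','n','t'] from rfl] at hu
    have hc : c = 'c' := (List.cons.injEq ..).mp hu.symm |>.1
    have ht : t = 'o'::'n'::'t'::'e'::'n'::'t':: u := by simpa using ((List.cons.injEq ..).mp hu.symm).2
    subst hc ht
    conv_lhs => rw [show ('c'::'o'::'n'::'t'::'e'::'n'::'t':: u) = "content".toList ++ u from rfl]
    rw [pyRep_append "SEO".toList "Search Engine Optimization".toList
      "content".toList (by decide)]
    rw [pyRep_match _ _ _ (by simp)]
    rw [pyRep_append "marketing".toList "digital marketing strategy".toList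
      "digital content".toList (by decide)]
    rw [scanRepl]
    rw [if_neg (by rw [show ('c'::'o'::'n'::'t'::'e'::'n'::'t':: u) = "content".toList ++ u from rfl] at h1; exact h1)]
    rw [if_pos (by rw [List.isPrefixOf_iff_prefix]; exact ⟨u, rfl⟩)]
    simp only [List.drop_succ_cons, List.drop_zero] at ih ⊢
    rw [ih]
  | case4 c t h1 h2 h3 ih =>
    rw [List.isPrefixOf_iff_prefix] at h3
    obtain ⟨u, hu⟩ := h3
    rw [show "marketing".toList = ['m','a','r','k','e','t','i','n','g'] from rfl] at hu
    have hc : c = 'm' := (List.cons.injEq ..).mp hu.symm |>.1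
    have ht : t = 'a'::'r'::'k'::'e'::'t'::'i'::'n'::'g':: u := by simpa using ((List.cons.injEq ..).mp hu.symm).2
    subst hc ht
    conv_lhs => rw [show ('m'::'a'::'r'::'k'::'e'::'t'::'i'::'n'::'g':: u) = "marketing".toList ++ u from rfl]
    rw [pyRep_append "SEO".toList "Search Engine Optimization".toList
      "marketing".toList (by decide)]
    rw [pyRep_append "content".toList "digital content".toList
      "marketing".toList (by decide)]
    rw [pyRep_match _ _ _ (by simp)]
    rw [scanRepl]
    rw [if_neg (by rw [show ('m'::'a'::'r'::'k'::'e'::'t'::'i'::'n'::'g':: u) = "marketing".toList ++ u from rfl] at h1; exact h1)]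
    rw [if_neg (by rw [show ('m'::'a'::'r'::'k'::'e'::'t'::'i'::'n'::'g':: u) = "marketing".toList ++ u from rfl] at h2; exact h2)]
    rw [if_pos (by rw [List.isPrefixOf_iff_prefix]; exact ⟨u, rfl⟩)]
    simp only [List.drop_succ_cons, List.drop_zero] at ih ⊢
    rw [ih]
  | case5 c t h1 h2 h3 ih =>
    -- no key matches at this position: all four functions shift by one character
    have e1 : pyRep "SEO".toList "Search Engine Optimization".toList (c :: t)
        = c :: pyRep "SEO".toList "Search Engine Optimization".toList t := by
      rw [pyRep, if_neg h1]
    have hA : ¬ ("content".toList).isPrefixOf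
        (c :: pyRep "SEO".toList "Search Engine Optimization".toList t) = true := by
      intro hpre
      rw [List.isPrefixOf_iff_prefix, show "content".toList = 'c' :: "ontent".toList from rfl,
        List.cons_prefix_cons] at hpre
      obtain ⟨hc, hw⟩ := hpre
      have := pyRep_prefix_pullback 'S' 'S' "EO".toList "earch Engine Optimization".toList
        t "ontent".toList (by exact hw) (by decide) (by decide)
      apply h2
      rw [List.isPrefixOf_iff_prefix, show "content".toList = 'c' :: "ontent".toList from rfl,
        List.cons_prefix_cons]
      exact ⟨hc, this⟩
    have e2 : pyRep "content".toList "digital content".toList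
        (c :: pyRep "SEO".toList "Search Engine Optimization".toList t)
        = c :: pyRep "content".toList "digital content".toList
            (pyRep "SEO".toList "Search Engine Optimization".toList t) := by
      rw [pyRep, if_neg hA]
    have hB : ¬ ("marketing".toList).isPrefixOf
        (c :: pyRep "content".toList "digital content".toList
          (pyRep "SEO".toList "Search Engine Optimization".toList t)) = true := by
      intro hpre
      rw [List.isPrefixOf_iff_prefix, show "marketing".toList = 'm' :: "arketing".toList from rfl,
        List.cons_prefix_cons] at hpre
      obtain ⟨hc, hw⟩ := hpre
      have hw1 := pyRep_prefix_pullback 'c' 'd' "ontent".toList "igital content".toList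
        (pyRep "SEO".toList "Search Engine Optimization".toList t) "arketing".toList
        (by exact hw) (by decide) (by decide)
      have hw2 := pyRep_prefix_pullback 'S' 'S' "EO".toList "earch Engine Optimization".toList
        t "arketing".toList (by exact hw1) (by decide) (by decide)
      apply h3
      rw [List.isPrefixOf_iff_prefix, show "marketing".toList = 'm' :: "arketing".toList from rfl,
        List.cons_prefix_cons]
      exact ⟨hc, hw2⟩
    have e3 : pyRep "marketing".toList "digital marketing strategy".toList
        (c :: pyRep "content".toList "digital content".toList
          (pyRep "SEO".toList "Search Engine Optimization".toList t))
        = c :: pyRep "marketing".toList "digital marketing strategy".toList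
            (pyRep "content".toList "digital content".toList
              (pyRep "SEO".toList "Search Engine Optimization".toList t)) := by
      rw [pyRep, if_neg hB]
    rw [e1, e2, e3, ih, scanRepl, if_neg h1, if_neg h2, if_neg h3]

-- ===== VERDICT (by name: the statement is the Claim_ definition above) =====
theorem optimize_content_spec : Claim_equal_optimize_content := by
  intro content mode _
  unfold Spec_optimize_content optimize_content optimize_content_alt
  by_cases hm : mode == "aggressive"
  · simp only [if_pos hm]
    rw [PySem.Str.replace, PySem.Str.replace, PySem.Str.replace,
      String.toList_ofList, String.toList_ofList]
    rw [replace_eq_pyRep _ _ _ (by simp), replace_eq_pyRep _ _ _ (by simp),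
      replace_eq_pyRep _ _ _ (by simp)]
    exact congrArg String.ofList (scan_eq_three content.toList)
  · simp only [if_neg hm]
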